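-- pv_equiv track=rewrite | github.com/MisterK-Qc/plexharvester | app/services/mkvtoolnix_service.py | get_mkv_status
-- ===== SOURCE A (Python) =====
-- from typing import Optional, Tuple, List, Dict
--
-- def get_mkv_status(languages: List[Dict]) -> str:
--     if not languages or any("erreur" in e.get("lang_code", "").lower() for e in languages):
--         return "Erreur"
--     codes = [e.get("lang_code", "").lower() for e in languages]
--     if any(c == "fr-ca" for c in codes):
--         return "OK"
--     if any(c.startswith("fr") and c != "fr-ca" for c in codes):
--         return "À traiter"
--     return "Pas de FR"
-- ===== SOURCE B (Python) =====
-- from typing import List, Dict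
--
-- _STATUS_TABLE = ["Pas de FR", "À traiter", "OK", "Erreur"]
--
-- def _rank(code: str) -> int:
--     if "erreur" in code:
--         return 3
--     if code == "fr-ca":
--         return 2
--     if code.startswith("fr"):
--         return 1
--     return 0
--
-- def get_mkv_status(languages: List[Dict]) -> str:
--     ranks = [_rank(e.get("lang_code", "").lower()) for e in languages]
--     if not ranks:
--         return "Erreur"
--     return _STATUS_TABLE[max(ranks)]
-- ===== Notes on version B (the rewrite author's own statement) =====
-- stated objective: alternative
-- what changed: Replaces A's staged boolean scans and branch chain with a classify-reduce-lookup scheme: each entry is mapped to a numeric severity rank (3 erreur, 2 fr-ca, 1 other fr, 0 none), the ranks are reduced with max, and the result indexes a status table.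
import Mathlib
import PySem

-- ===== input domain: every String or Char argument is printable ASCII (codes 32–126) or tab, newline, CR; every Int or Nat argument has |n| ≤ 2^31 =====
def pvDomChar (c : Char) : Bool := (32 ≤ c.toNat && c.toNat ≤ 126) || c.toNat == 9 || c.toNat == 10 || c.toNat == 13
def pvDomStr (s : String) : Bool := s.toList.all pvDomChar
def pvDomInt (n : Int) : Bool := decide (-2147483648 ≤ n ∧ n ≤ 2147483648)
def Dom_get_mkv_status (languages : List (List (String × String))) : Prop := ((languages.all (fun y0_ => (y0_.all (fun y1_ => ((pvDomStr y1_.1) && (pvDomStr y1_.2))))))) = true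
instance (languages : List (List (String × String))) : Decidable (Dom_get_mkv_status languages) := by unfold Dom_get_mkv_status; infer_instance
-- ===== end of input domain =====

-- B replaces A's staged boolean scans with a classify-reduce-lookup scheme: each entry is
-- mapped to a numeric severity rank, the ranks are reduced by max, and the result indexes a
-- status table; alternative decomposition, same values.

-- ===== PORT A =====
-- e.get("lang_code", "").lower()
def pvCodeOf (e : List (String × String)) : String :=
  PySem.Str.lower ((PySem.Dict.mk e).getD "lang_code" "")

def get_mkv_status (languages : List (List (String × String))) : String :=
  if languages.isEmpty || languages.any (fun e => PySem.Str.isIn "erreur" (pvCodeOf e)) then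
    "Erreur"
  else
    let codes := languages.map (fun e => pvCodeOf e)
    if codes.any (fun c => c == "fr-ca") then "OK"
    else if codes.any (fun c => PySem.Str.startswith c "fr" && c != "fr-ca") then "À traiter"
    else "Pas de FR"

-- ===== PORT B =====
def pvStatusTable : List String := ["Pas de FR", "À traiter", "OK", "Erreur"]

def pvRank (code : String) : Int :=
  if PySem.Str.isIn "erreur" code then 3
  else if code == "fr-ca" then 2
  else if PySem.Str.startswith code "fr" then 1
  else 0

def get_mkv_status_alt (languages : List (List (String × String))) : String :=
  let ranks := languages.map (fun e => pvRank (pvCodeOf e))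
  if ranks.isEmpty then "Erreur"
  else
    -- _STATUS_TABLE[max(ranks)]; max of a nonempty list via PySem.List.max?, and the
    -- index is always 0..3 so pyGet? is some (the .getD "" is never taken)
    match PySem.List.max? ranks (fun y => y) with
    | some m => (PySem.List.pyGet? pvStatusTable m).getD ""
    | none => ""

-- ===== PRECONDITION & SPEC =====
def Spec_get_mkv_status (languages : List (List (String × String))) (out : String) : Prop := out = get_mkv_status_alt languages
instance (languages : List (List (String × String))) (out : String) : Decidable (Spec_get_mkv_status languages out) := by unfold Spec_get_mkv_status; infer_instance

-- ===== CLAIM =====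
def Claim_equal_get_mkv_status : Prop := ∀ (languages : List (List (String × String))), Dom_get_mkv_status languages → Spec_get_mkv_status languages (get_mkv_status languages)

-- ===== LEMMAS AND PROOFS =====
-- the severity value the branch chain on the three any-scans would pick
def pvVal (l : List (List (String × String))) : Int :=
  if l.any (fun e => PySem.Str.isIn "erreur" (pvCodeOf e)) then 3
  else if l.any (fun e => pvCodeOf e == "fr-ca") then 2
  else if l.any (fun e => PySem.Str.startswith (pvCodeOf e) "fr" && pvCodeOf e != "fr-ca") then 1
  else 0

theorem pv_max_if (e c s a b d : Bool) :
    max (if e then (3:Int) else if c then 2 else if s then 1 else 0)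
        (if a then (3:Int) else if b then 2 else if d then 1 else 0)
      = if (e || a) then (3:Int) else if (c || b) then 2 else if ((s && !c) || d) then 1 else 0 := by
  revert e c s a b d; decide

theorem pv_rank_val (x : List (String × String)) (t : List (List (String × String))) :
    max (pvRank (pvCodeOf x)) (pvVal t) = pvVal (x :: t) := by
  unfold pvRank pvVal
  simp only [List.any_cons, bne]
  exact pv_max_if _ _ _ _ _ _

theorem pv_foldl_max (l : List (List (String × String))) (a : Int) (ha : 0 ≤ a) :
    (l.map (fun e => pvRank (pvCodeOf e))).foldl max a = max a (pvVal l) := by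
  induction l generalizing a with
  | nil => simp [pvVal]; omega
  | cons x t ih =>
      simp only [List.map_cons, List.foldl_cons]
      rw [ih _ (le_max_of_le_left ha)]
      rw [max_assoc, pv_rank_val]

theorem pv_table (l : List (List (String × String))) :
    (if l.any (fun e => PySem.Str.isIn "erreur" (pvCodeOf e)) then "Erreur"
     else if l.any (fun e => pvCodeOf e == "fr-ca") then "OK"
     else if l.any (fun e => PySem.Str.startswith (pvCodeOf e) "fr" && pvCodeOf e != "fr-ca") then "À traiter"
     else "Pas de FR")
      = (PySem.List.pyGet? pvStatusTable (pvVal l)).getD "" := by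
  unfold pvVal
  split_ifs <;> rfl

theorem get_mkv_status_spec : Claim_equal_get_mkv_status := by
  intro languages _
  show get_mkv_status languages = get_mkv_status_alt languages
  unfold get_mkv_status get_mkv_status_alt
  cases languages with
  | nil => rfl
  | cons x t =>
      simp only [List.any_map, Function.comp_def]
      simp only [List.map_cons, List.isEmpty_cons, Bool.false_or, Bool.false_eq_true, if_false]
      rw [PySem.List.max?_id_cons]
      rw [pv_foldl_max t _ (by unfold pvRank; split_ifs <;> decide), pv_rank_val]
      exact pv_table (x :: t)
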